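-- pv_equiv track=rewrite | github.com/Jiaweihu08/EPI | 12 - Hash Tables/12.6 - smallest_subarray_covering_all_values.py | find_smallest_subarray_covering_set_linkedlist
-- ===== SOURCE A (Python) =====
-- import collections
--
-- Subarray = collections.namedtuple('Subarray', ('start', 'end'))
--
-- def find_smallest_subarray_covering_set_linkedlist(paragraph, keywords):
-- 	"""
-- 	Iterate over the array and entries that are keywords are stored in a
-- 	doubly linked list, using their indices at values. The indices are
-- 	stored in order and each time an entry that's already in the list is
-- 	encountered the old one is removed and the new one is inserted to the
-- 	end of the list
--
-- 	When the size of the list reaches that of the keywords, the the size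
-- 	of the subarray is computed and the smallest one is returned at the end
-- 	"""
-- 	class DoublyLinkedListNode:
-- 		def __init__(self, data=None):
-- 			self.data = data
-- 			self.prev = self.next = None
--
-- 	class LinkedList:
-- 		def __init__(self):
-- 			self.head = self.tail = None
-- 			self._size = 0
--
-- 		def __len__(self):
-- 			return self._size
--
-- 		def insert_after(self, value):
-- 			node = DoublyLinkedListNode(value)
-- 			node.prev = self.tail
-- 			if self.tail:
-- 				self.tail.next = node
-- 			else:
-- 				self.head = node
-- 			self.tail = node
-- 			self._size += 1
--
-- 		def remove(self, node):
-- 			if node.next: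
-- 				node.next.prev = node.prev
-- 			else:
-- 				self.tail = node.prev
-- 			if node.prev:
-- 				node.prev.next = node.next
-- 			else:
-- 				self.head = node.next
-- 			node.prev = node.next = None
-- 			self._size -= 1
--
-- 	loc = LinkedList()
-- 	d = {s: None for s in keywords}
-- 	result = Subarray(start=-1, end=-1)
-- 	for idx, s in enumerate(paragraph):
-- 		if s in d:
-- 			it = d[s]
-- 			if it is not None:
-- 				loc.remove(it)
-- 			loc.insert_after(idx)
-- 			d[s] = loc.tail
--
-- 			if len(loc) == len(keywords):
-- 				if (result == Subarray(start=-1, end=-1)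
-- 					or idx - loc.head.data < result.end - result.start):
-- 					result = Subarray(start=loc.head.data, end=idx)
-- 	return result
-- ===== SOURCE B (Python) =====
-- import collections
--
-- Subarray = collections.namedtuple('Subarray', ('start', 'end'))
--
-- def find_smallest_subarray_covering_set_linkedlist(paragraph, keywords):
-- 	"""Dict of last-occurrence indices instead of a doubly linked list:
-- 	when every keyword has been seen, the candidate window starts at the
-- 	minimum of the last-occurrence indices."""
-- 	kws = set(keywords)
-- 	last = {}
-- 	result = Subarray(start=-1, end=-1)
-- 	for idx, s in enumerate(paragraph):
-- 		if s in kws: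
-- 			last[s] = idx
-- 			if len(last) == len(keywords):
-- 				start = min(last.values())
-- 				if (result == Subarray(start=-1, end=-1)
-- 					or idx - start < result.end - result.start):
-- 					result = Subarray(start=start, end=idx)
-- 	return result
-- ===== Notes on version B (the rewrite author's own statement) =====
-- stated objective: simpler
-- what changed: Replaces A's hand-rolled doubly linked list of keyword occurrences (plus dict of node pointers) by a plain dict of last-occurrence indices, taking min(last.values()) as the window start whenever every keyword has been seen.
import Mathlib
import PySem

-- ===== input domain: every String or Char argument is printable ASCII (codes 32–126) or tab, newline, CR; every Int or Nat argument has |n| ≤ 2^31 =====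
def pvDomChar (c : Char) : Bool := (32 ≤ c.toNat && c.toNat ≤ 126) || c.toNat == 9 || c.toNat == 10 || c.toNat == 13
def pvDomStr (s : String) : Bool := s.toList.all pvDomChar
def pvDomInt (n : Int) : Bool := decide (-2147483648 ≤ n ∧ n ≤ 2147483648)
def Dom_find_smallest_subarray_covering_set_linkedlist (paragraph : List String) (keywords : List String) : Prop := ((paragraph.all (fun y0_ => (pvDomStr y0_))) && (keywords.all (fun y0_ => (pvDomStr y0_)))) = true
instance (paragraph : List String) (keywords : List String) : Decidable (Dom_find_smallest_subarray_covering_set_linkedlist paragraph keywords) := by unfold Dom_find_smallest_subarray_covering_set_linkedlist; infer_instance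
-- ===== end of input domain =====

-- B replaces A's doubly linked list of keyword occurrences by a dict of last-occurrence
-- indices with a min-scan over its values when all keywords are present (objective: simpler).

-- ===== PORT A =====
-- A's linked list `loc` is modelled by the list of its node data in list order: insert_after
-- appends at the tail; remove(it) removes the node holding the value `it` — exact because the
-- node data are distinct paragraph indices, so erasing by value removes exactly that node.
-- `d[s]` stores the removed/inserted node as its data value (Option Int, None initially).
def pvAStep (kwlen : Nat) (st : List Int × PySem.Dict String (Option Int) × (Int × Int))
    (p : Int × String) : List Int × PySem.Dict String (Option Int) × (Int × Int) :=
  let loc := st.1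
  let d := st.2.1
  let result := st.2.2
  if d.contains p.2 then
    let it := (d.get? p.2).getD none
    let loc2 := (match it with | some v => loc.erase v | none => loc) ++ [p.1]
    let d2 := d.insert p.2 (some p.1)
    let result2 :=
      if loc2.length == kwlen then
        if result == ((-1 : Int), (-1 : Int)) || p.1 - loc2.headI < result.2 - result.1 then
          (loc2.headI, p.1)  -- loc2 ≠ [] (just appended), so headI is loc.head
        else result
      else result
    (loc2, d2, result2)
  else (loc, d, result)

def find_smallest_subarray_covering_set_linkedlist (paragraph : List String) (keywords : List String) : Int × Int :=
  let d0 : PySem.Dict String (Option Int) :=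
    keywords.foldl (fun d s => d.insert s none) PySem.Dict.empty  -- {s: None for s in keywords}
  ((PySem.List.enumerate paragraph 0).foldl (pvAStep keywords.length)
    ([], d0, ((-1 : Int), (-1 : Int)))).2.2

-- ===== PORT B =====
def pvBStep (kws : PySem.Set String) (kwlen : Nat) (st : PySem.Dict String Int × (Int × Int))
    (p : Int × String) : PySem.Dict String Int × (Int × Int) :=
  let last := st.1
  let result := st.2
  if PySem.Set.contains kws p.2 then
    let last2 := last.insert p.2 p.1
    let result2 :=
      if last2.size == kwlen then
        -- min(last.values()): last2 just received a key, so values ≠ [] and min? never defaults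
        let start := (PySem.List.min? last2.values (fun x => x)).getD 0
        if result == ((-1 : Int), (-1 : Int)) || p.1 - start < result.2 - result.1 then
          (start, p.1)
        else result
      else result
    (last2, result2)
  else (last, result)

def find_smallest_subarray_covering_set_linkedlist_alt (paragraph : List String) (keywords : List String) : Int × Int :=
  ((PySem.List.enumerate paragraph 0).foldl
    (pvBStep (PySem.Set.ofList keywords) keywords.length)
    (PySem.Dict.empty, ((-1 : Int), (-1 : Int)))).2

-- ===== PRECONDITION & SPEC =====
def Spec_find_smallest_subarray_covering_set_linkedlist (paragraph : List String) (keywords : List String) (out : Int × Int) : Prop := out = find_smallest_subarray_covering_set_linkedlist_alt paragraph keywords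
instance (paragraph : List String) (keywords : List String) (out : Int × Int) : Decidable (Spec_find_smallest_subarray_covering_set_linkedlist paragraph keywords out) := by unfold Spec_find_smallest_subarray_covering_set_linkedlist; infer_instance

-- ===== CLAIM (what is proved, stated in full; the proofs are below) =====
def Claim_equal_find_smallest_subarray_covering_set_linkedlist : Prop := ∀ (paragraph : List String) (keywords : List String), Dom_find_smallest_subarray_covering_set_linkedlist paragraph keywords → Spec_find_smallest_subarray_covering_set_linkedlist paragraph keywords (find_smallest_subarray_covering_set_linkedlist paragraph keywords)

-- ===== LEMMAS AND PROOFS =====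

-- The coupling invariant between A's state (loc, d, result) and B's state (last, result):
-- results agree; loc is strictly increasing, is a permutation of last's values, and all its
-- entries are below the next index; d and last hold the same last-occurrence bindings, d's
-- key set is exactly the keywords, and last's keys are unique.
def pvInv (keywords : List String) (i0 : Int)
    (stA : List Int × PySem.Dict String (Option Int) × (Int × Int))
    (stB : PySem.Dict String Int × (Int × Int)) : Prop :=
  stA.2.2 = stB.2 ∧
  stA.1.Pairwise (· < ·) ∧
  stA.1.Perm stB.1.values ∧
  (∀ x ∈ stA.1, x < i0) ∧
  (∀ s, stA.2.1.contains s = decide (s ∈ keywords)) ∧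
  (∀ s v, stA.2.1.get? s = some (some v) ↔ stB.1.get? s = some v) ∧
  stB.1.keys.Nodup

lemma pvHead_min (l V : List Int) (hp : l.Perm V) (hs : l.Pairwise (· < ·)) (hne : l ≠ []) :
    (PySem.List.min? V (fun x => x)).getD 0 = l.headI := by
  cases l with
  | nil => exact absurd rfl hne
  | cons a t =>
    have hVne : V ≠ [] := by
      intro hV; subst hV; exact List.cons_ne_nil a t hp.eq_nil
    obtain ⟨m, hm⟩ : ∃ m, PySem.List.min? V (fun x => x) = some m := by
      cases hmin : PySem.List.min? V (fun x => x) with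
      | none => exact absurd ((PySem.List.min?_eq_none_iff _ _).1 hmin) hVne
      | some m => exact ⟨m, rfl⟩
    have hmem : m ∈ a :: t := hp.mem_iff.2 (PySem.List.min?_mem hm)
    have hle : m ≤ a := PySem.List.min?_isMin hm a (hp.mem_iff.1 List.mem_cons_self)
    have hge : a ≤ m := by
      rcases List.mem_cons.1 hmem with h | h
      · exact le_of_eq h.symm
      · exact le_of_lt ((List.pairwise_cons.1 hs).1 m h)
    rw [hm]
    simp only [Option.getD_some, List.headI]
    omega

lemma pvD0_get? (keywords : List String) (d : PySem.Dict String (Option Int))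
    (h : ∀ s w, d.get? s = some w → w = none) :
    ∀ s w, (keywords.foldl (fun d s => d.insert s none) d).get? s = some w → w = none := by
  induction keywords generalizing d with
  | nil => exact h
  | cons k ks ih =>
    intro s w
    simp only [List.foldl_cons]
    refine ih (d.insert k none) ?_ s w
    intro s' w' hw'
    rw [PySem.Dict.get?_insert] at hw'
    split at hw'
    · exact (Option.some_inj.1 hw').symm
    · exact h s' w' hw'

lemma pvD0_contains (keywords : List String) (d : PySem.Dict String (Option Int)) :
    ∀ s, (keywords.foldl (fun d s => d.insert s none) d).contains s
      = (decide (s ∈ keywords) || d.contains s) := by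
  induction keywords generalizing d with
  | nil => intro s; simp
  | cons k ks ih =>
    intro s
    simp only [List.foldl_cons]
    rw [ih (d.insert k none) s, PySem.Dict.contains_insert]
    by_cases h : s = k
    · simp [h]
    · have hbk : (s == k) = false := beq_eq_false_iff_ne.2 h
      simp [hbk, h, List.mem_cons]

lemma pvResult_eq (kwlen : Nat) (i0 : Int) (loc2 values2 : List Int) (res : Int × Int)
    (hperm : loc2.Perm values2) (hs : loc2.Pairwise (· < ·)) (hne : loc2 ≠ []) :
    (if loc2.length == kwlen then
       if res == ((-1 : Int), (-1 : Int)) || i0 - loc2.headI < res.2 - res.1 then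
         (loc2.headI, i0)
       else res
     else res)
    = (if values2.length == kwlen then
         if res == ((-1 : Int), (-1 : Int)) ||
             i0 - (PySem.List.min? values2 (fun x => x)).getD 0 < res.2 - res.1 then
           ((PySem.List.min? values2 (fun x => x)).getD 0, i0)
         else res
       else res) := by
  rw [hperm.length_eq, pvHead_min loc2 values2 hperm hs hne]

lemma pvStep_inv (keywords : List String) (i0 : Int) (s : String)
    (stA : List Int × PySem.Dict String (Option Int) × (Int × Int))
    (stB : PySem.Dict String Int × (Int × Int))
    (h : pvInv keywords i0 stA stB) :
    pvInv keywords (i0 + 1) (pvAStep keywords.length stA (i0, s))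
      (pvBStep (PySem.Set.ofList keywords) keywords.length stB (i0, s)) := by
  obtain ⟨loc, d, res⟩ := stA
  obtain ⟨last, resB⟩ := stB
  obtain ⟨h1, h2, h3, h4, h5, h6, h7⟩ := h
  dsimp only at h1 h2 h3 h4 h5 h6 h7
  have hset : PySem.Set.contains (PySem.Set.ofList keywords) s = decide (s ∈ keywords) := by
    simp [PySem.Set.contains]
  by_cases hc : d.contains s = true
  · -- keyword branch taken on both sides
    have hskw : s ∈ keywords := by
      have := (h5 s).symm.trans hc; simpa using this
    have hsb : PySem.Set.contains (PySem.Set.ofList keywords) s = true := by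
      rw [hset]; simpa using hskw
    have hsize : (last.insert s i0).size = (last.insert s i0).values.length := by
      simp [PySem.Dict.size, PySem.Dict.values]
    obtain ⟨w, hw⟩ : ∃ w, d.get? s = some w := by
      have := PySem.Dict.contains_eq_isSome_get? d s
      rw [hc] at this
      cases hg : d.get? s with
      | none => rw [hg] at this; simp at this
      | some w => exact ⟨w, rfl⟩
    have h5' : ∀ s', (d.insert s (some i0)).contains s' = decide (s' ∈ keywords) := by
      intro s'
      rw [PySem.Dict.contains_insert]
      cases Decidable.em (s' = s) with
      | inl he => subst he; simp [hskw]
      | inr he => simp [he, h5 s']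
    have h6' : ∀ s' v', (d.insert s (some i0)).get? s' = some (some v') ↔
        (last.insert s i0).get? s' = some v' := by
      intro s' v'
      rw [PySem.Dict.get?_insert, PySem.Dict.get?_insert]
      split
      · simp
      · exact h6 s' v'
    have h7' : (last.insert s i0).keys.Nodup := PySem.Dict.nodup_keys_insert last s i0 h7
    have hBeq : pvBStep (PySem.Set.ofList keywords) keywords.length (last, resB) (i0, s) =
        (last.insert s i0,
         if (last.insert s i0).size == keywords.length then
           if resB == ((-1 : Int), (-1 : Int)) ||
               i0 - (PySem.List.min? (last.insert s i0).values (fun x => x)).getD 0 <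
                 resB.2 - resB.1 then
             ((PySem.List.min? (last.insert s i0).values (fun x => x)).getD 0, i0)
           else resB
         else resB) := by
      simp only [pvBStep]
      rw [hsb]
      rfl
    cases hB : last.get? s with
    | some v =>
      -- s already seen: A erases the old node, B overwrites the binding in place
      have hdg : d.get? s = some (some v) := (h6 s v).2 hB
      have hlc : last.contains s = true := by
        rw [PySem.Dict.contains_eq_isSome_get?, hB]; rfl
      obtain ⟨I1, I2, hI⟩ := List.append_of_mem
        ((PySem.Dict.get?_eq_some_iff_mem_items last s v h7).1 hB)
      have hkeys : (I1.map Prod.fst ++ s :: I2.map Prod.fst).Nodup := by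
        have := h7
        simp only [PySem.Dict.keys, hI, List.map_append, List.map_cons] at this
        exact this
      have hI1 : ∀ p ∈ I1, p.1 ≠ s := by
        intro p hp he
        have : s ∈ I1.map Prod.fst := by
          rw [← he]; exact List.mem_map_of_mem hp
        exact (List.disjoint_of_nodup_append hkeys) this List.mem_cons_self
      have hI2 : ∀ p ∈ I2, p.1 ≠ s := by
        intro p hp he
        have hnd := (List.nodup_append.1 hkeys).2.1
        have : s ∈ I2.map Prod.fst := by
          rw [← he]; exact List.mem_map_of_mem hp
        exact (List.nodup_cons.1 hnd).1 this
      have hitems2 : (last.insert s i0).items = I1 ++ (s, i0) :: I2 := by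
        rw [PySem.Dict.items_insert_of_contains last i0 hlc, hI]
        rw [List.map_append, List.map_cons]
        congr 1
        · conv_rhs => rw [← List.map_id I1]
          exact List.map_congr_left (fun p hp => by simp [hI1 p hp])
        · congr 1
          · simp
          · conv_rhs => rw [← List.map_id I2]
            exact List.map_congr_left (fun p hp => by simp [hI2 p hp])
      have hvals : last.values = I1.map Prod.snd ++ v :: I2.map Prod.snd := by
        simp [PySem.Dict.values, hI]
      have hvals2 : (last.insert s i0).values = I1.map Prod.snd ++ i0 :: I2.map Prod.snd := by
        simp [PySem.Dict.values, hitems2]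
      have hploc : loc.Perm (I1.map Prod.snd ++ v :: I2.map Prod.snd) := hvals ▸ h3
      have hperm2 : ((loc.erase v) ++ [i0]).Perm ((last.insert s i0).values) := by
        rw [hvals2]
        have e1 : (loc.erase v).Perm (I1.map Prod.snd ++ I2.map Prod.snd) := by
          refine (hploc.erase v).trans ?_
          have h' := ((List.perm_middle (a := v) (l₁ := I1.map Prod.snd)
            (l₂ := I2.map Prod.snd)).symm.erase v).symm
          simpa [List.erase_cons_head] using h'
        refine ((e1.append_right [i0]).trans ?_)
        refine (List.perm_append_singleton i0 _).trans ?_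
        exact List.perm_middle.symm
      have hsub : ∀ x ∈ loc.erase v, x < i0 := fun x hx => h4 x (List.erase_subset hx)
      have hsort2 : ((loc.erase v) ++ [i0]).Pairwise (· < ·) := by
        rw [List.pairwise_append]
        refine ⟨h2.sublist List.erase_sublist, by simp, ?_⟩
        intro x hx y hy; simp at hy; subst hy; exact hsub x hx
      have hne2 : (loc.erase v) ++ [i0] ≠ [] := by simp
      have hA : pvAStep keywords.length (loc, d, res) (i0, s) =
          ((loc.erase v) ++ [i0], d.insert s (some i0),
           if ((loc.erase v) ++ [i0]).length == keywords.length then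
             if res == ((-1 : Int), (-1 : Int)) ||
                 i0 - ((loc.erase v) ++ [i0]).headI < res.2 - res.1 then
               (((loc.erase v) ++ [i0]).headI, i0)
             else res
           else res) := by
        simp only [pvAStep]
        rw [hc, hdg]
        rfl
      rw [hA, hBeq]
      unfold pvInv
      refine ⟨?_, hsort2, hperm2, ?_, h5', h6', h7'⟩
      · dsimp only
        rw [h1, hsize, pvResult_eq keywords.length i0 _ _ resB hperm2 hsort2 hne2]
      · intro x hx
        rcases List.mem_append.1 hx with hx | hx
        · have := hsub x hx; omega
        · simp at hx; omega
    | none =>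
      -- s not yet seen: A appends a fresh node, B inserts a fresh key
      have hwn : w = none := by
        cases w with
        | none => rfl
        | some v => exact absurd ((h6 s v).1 hw) (by simp [hB])
      subst hwn
      have hlc : last.contains s = false := by
        rw [PySem.Dict.contains_eq_isSome_get?, hB]; rfl
      have hvals2 : (last.insert s i0).values = last.values ++ [i0] := by
        simp [PySem.Dict.values, PySem.Dict.items_insert_of_not_contains last i0 hlc]
      have hperm2 : (loc ++ [i0]).Perm ((last.insert s i0).values) := by
        rw [hvals2]; exact h3.append_right [i0]
      have hsort2 : (loc ++ [i0]).Pairwise (· < ·) := by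
        rw [List.pairwise_append]
        refine ⟨h2, by simp, ?_⟩
        intro x hx y hy; simp at hy; subst hy; exact h4 x hx
      have hne2 : loc ++ [i0] ≠ [] := by simp
      have hA : pvAStep keywords.length (loc, d, res) (i0, s) =
          (loc ++ [i0], d.insert s (some i0),
           if (loc ++ [i0]).length == keywords.length then
             if res == ((-1 : Int), (-1 : Int)) ||
                 i0 - (loc ++ [i0]).headI < res.2 - res.1 then
               ((loc ++ [i0]).headI, i0)
             else res
           else res) := by
        simp only [pvAStep]
        rw [hc, hw]
        rfl
      rw [hA, hBeq]
      unfold pvInv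
      refine ⟨?_, hsort2, hperm2, ?_, h5', h6', h7'⟩
      · dsimp only
        rw [h1, hsize, pvResult_eq keywords.length i0 _ _ resB hperm2 hsort2 hne2]
      · intro x hx
        rcases List.mem_append.1 hx with hx | hx
        · have := h4 x hx; omega
        · simp at hx; omega
  · -- not a keyword occurrence: both states unchanged
    have hc' : d.contains s = false := by simpa using hc
    have hsb : PySem.Set.contains (PySem.Set.ofList keywords) s = false := by
      rw [hset, ← h5 s]; exact hc'
    have hA : pvAStep keywords.length (loc, d, res) (i0, s) = (loc, d, res) := by
      simp only [pvAStep]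
      rw [hc']
      rfl
    have hBeq : pvBStep (PySem.Set.ofList keywords) keywords.length (last, resB) (i0, s)
        = (last, resB) := by
      simp only [pvBStep]
      rw [hsb]
      rfl
    rw [hA, hBeq]
    unfold pvInv
    refine ⟨h1, h2, h3, ?_, h5, h6, h7⟩
    intro x hx; have := h4 x hx; omega

lemma pvFold_inv (keywords : List String) (xs : List String) :
    ∀ (i0 : Int) stA stB, pvInv keywords i0 stA stB →
    pvInv keywords (i0 + xs.length)
      ((PySem.List.enumerate xs i0).foldl (pvAStep keywords.length) stA)
      ((PySem.List.enumerate xs i0).foldl (pvBStep (PySem.Set.ofList keywords) keywords.length) stB) := by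
  induction xs with
  | nil => intro i0 stA stB h; simpa [PySem.List.enumerate] using h
  | cons x t ih =>
    intro i0 stA stB h
    rw [PySem.List.enumerate_cons]
    simp only [List.foldl_cons]
    have := ih (i0 + 1) _ _ (pvStep_inv keywords i0 x stA stB h)
    have harith : i0 + 1 + (t.length : Int) = i0 + ((t.length + 1 : Nat) : Int) := by
      push_cast; ring
    rw [harith] at this
    simpa using this

-- ===== VERDICT (by name: the statement is the Claim_ definition above) =====
theorem find_smallest_subarray_covering_set_linkedlist_spec : Claim_equal_find_smallest_subarray_covering_set_linkedlist := by
  intro paragraph keywords _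
  unfold Spec_find_smallest_subarray_covering_set_linkedlist
  unfold find_smallest_subarray_covering_set_linkedlist find_smallest_subarray_covering_set_linkedlist_alt
  have h0 : pvInv keywords 0
      ([], keywords.foldl (fun d s => d.insert s none) PySem.Dict.empty, ((-1 : Int), (-1 : Int)))
      (PySem.Dict.empty, ((-1 : Int), (-1 : Int))) := by
    refine ⟨rfl, by simp, by simp [PySem.Dict.values, PySem.Dict.empty], by simp, ?_, ?_, ?_⟩
    · intro s
      have := pvD0_contains keywords PySem.Dict.empty s
      simpa [PySem.Dict.contains_empty] using this
    · intro s v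
      constructor
      · intro hv
        exact absurd (pvD0_get? keywords PySem.Dict.empty (by simp [PySem.Dict.get?_empty]) s _ hv)
          (by simp)
      · intro hv; simp [PySem.Dict.get?_empty] at hv
    · simp
  exact (pvFold_inv keywords paragraph 0 _ _ h0).1
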